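-- pv_equiv track=rewrite | github.com/lfzCarlosC/crypto-signal | app/behaviour.py | lastNMinusMacdVolume
-- ===== SOURCE A (Python) =====
-- def lastNMinusMacdVolume(delta_macd):
--     result = []
--     min = 0
--     negativeStarted = False
--     for x in reversed(delta_macd):
--         if(x <= 0):
--             negativeStarted = True
--             if(x < min):
--                 min = x
--             result.append(x)
--         elif negativeStarted: #always return from here
--             return (result, min)
--     return (result, min)
-- ===== SOURCE B (Python) =====
-- def lastNMinusMacdVolume(delta_macd):
--     # Forward single pass: track the current contiguous non-positive run;
--     # when a positive breaks a non-empty run, remember it as the last completed run.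
--     cur = []
--     last = []
--     for x in delta_macd:
--         if x <= 0:
--             cur.append(x)
--         elif cur:
--             last = cur
--             cur = []
--     run = cur if cur else last
--     return (list(reversed(run)), min([0] + run))
-- ===== Notes on version B (the rewrite author's own statement) =====
-- stated objective: alternative
-- what changed: B scans the list FORWARD once, maintaining the current contiguous non-positive run and the last completed run (instead of A's reversed scan with an early return and fused min tracking), then reverses the winning run and computes its minimum, floored at zero, as a separate reduction.
import Mathlib
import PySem

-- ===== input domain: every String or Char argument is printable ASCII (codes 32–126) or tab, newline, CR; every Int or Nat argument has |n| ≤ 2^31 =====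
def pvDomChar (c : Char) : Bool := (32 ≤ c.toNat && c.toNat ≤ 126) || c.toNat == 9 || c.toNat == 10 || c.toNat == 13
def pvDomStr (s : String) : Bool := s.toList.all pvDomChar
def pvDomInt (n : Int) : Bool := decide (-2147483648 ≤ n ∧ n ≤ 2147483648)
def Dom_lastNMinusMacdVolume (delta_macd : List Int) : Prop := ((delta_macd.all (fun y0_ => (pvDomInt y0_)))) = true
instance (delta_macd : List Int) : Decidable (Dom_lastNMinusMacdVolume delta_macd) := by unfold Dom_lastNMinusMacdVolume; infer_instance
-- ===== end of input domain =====

-- B replaces A's reversed scan (fused skip/collect/min/early-return) by a forward pass that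
-- tracks contiguous non-positive runs and keeps the last one, plus a separate min reduction.
-- ===== PORT A =====
def lastNMinusMacdVolume_go : List Int → List Int → Int → Bool → List Int × Int
  | [], result, m, _ => (result, m)
  | x :: xs, result, m, negStarted =>
    if x ≤ 0 then
      lastNMinusMacdVolume_go xs (result ++ [x]) (if x < m then x else m) true
    else if negStarted then (result, m)
    else lastNMinusMacdVolume_go xs result m negStarted

def lastNMinusMacdVolume (delta_macd : List Int) : List Int × Int :=
  lastNMinusMacdVolume_go delta_macd.reverse [] 0 false

-- ===== PORT B =====
def lastNMinusMacdVolume_altStep (s : List Int × List Int) (x : Int) : List Int × List Int :=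
  if x ≤ 0 then (s.1 ++ [x], s.2)
  else if s.1 = [] then s
  else ([], s.1)

def lastNMinusMacdVolume_alt (delta_macd : List Int) : List Int × Int :=
  let s := delta_macd.foldl lastNMinusMacdVolume_altStep ([], [])
  let run := if s.1 = [] then s.2 else s.1
  (run.reverse, run.foldl min 0)

-- ===== PRECONDITION & SPEC =====
def Spec_lastNMinusMacdVolume (delta_macd : List Int) (out : List Int × Int) : Prop := out = lastNMinusMacdVolume_alt delta_macd
instance (delta_macd : List Int) (out : List Int × Int) : Decidable (Spec_lastNMinusMacdVolume delta_macd out) := by unfold Spec_lastNMinusMacdVolume; infer_instance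

-- ===== CLAIM (what is proved, stated in full; the proofs are below) =====
def Claim_equal_lastNMinusMacdVolume : Prop := ∀ (delta_macd : List Int), Dom_lastNMinusMacdVolume delta_macd → Spec_lastNMinusMacdVolume delta_macd (lastNMinusMacdVolume delta_macd)

-- ===== LEMMAS AND PROOFS =====

-- A's result list, characterised: trailing non-positive run of the reversed input.
def pvTail (l : List Int) : List Int :=
  (l.reverse.dropWhile (fun x => x > 0)).takeWhile (fun x => x ≤ 0)

lemma go_collect (l : List Int) (res : List Int) (m : Int) :
    lastNMinusMacdVolume_go l res m true =
      (res ++ l.takeWhile (fun x => x ≤ 0),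
       (l.takeWhile (fun x => x ≤ 0)).foldl min m) := by
  induction l generalizing res m with
  | nil => simp [lastNMinusMacdVolume_go]
  | cons x xs ih =>
    by_cases hx : x ≤ 0
    · simp only [lastNMinusMacdVolume_go, if_pos hx, ih]
      rw [show (if x < m then x else m) = min m x from by omega]
      simp [hx]
    · simp [lastNMinusMacdVolume_go, hx]

lemma go_main (l : List Int) :
    lastNMinusMacdVolume_go l.reverse [] 0 false = (pvTail l, (pvTail l).foldl min 0) := by
  unfold pvTail
  generalize l.reverse = r
  induction r with
  | nil => simp [lastNMinusMacdVolume_go]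
  | cons x xs ih =>
    by_cases hx : x ≤ 0
    · have hx' : ¬ x > 0 := by omega
      simp only [lastNMinusMacdVolume_go, if_pos hx, go_collect]
      rw [show (if x < (0:Int) then x else 0) = min 0 x from by omega]
      simp [hx, hx']
    · simp only [lastNMinusMacdVolume_go, if_neg hx, if_neg (Bool.false_ne_true),
        List.dropWhile_cons, decide_eq_true (by omega : x > 0)]
      exact ih

-- B's fold state, characterised against pvTail.
lemma alt_inv (l : List Int) :
    (l.foldl lastNMinusMacdVolume_altStep ([], [])).1
      = (l.reverse.takeWhile (fun x => x ≤ 0)).reverse ∧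
    (if (l.foldl lastNMinusMacdVolume_altStep ([], [])).1 = []
       then (l.foldl lastNMinusMacdVolume_altStep ([], [])).2
       else (l.foldl lastNMinusMacdVolume_altStep ([], [])).1).reverse = pvTail l := by
  induction l using List.reverseRecOn with
  | nil => simp [pvTail]
  | append_singleton l x ih =>
    obtain ⟨h1, h2⟩ := ih
    rw [List.foldl_append]
    simp only [List.foldl_cons, List.foldl_nil]
    by_cases hx : x ≤ 0
    · have hx' : ¬ x > 0 := by omega
      constructor
      · simp [lastNMinusMacdVolume_altStep, hx, h1]
      · simp only [lastNMinusMacdVolume_altStep, if_pos hx]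
        have hne : (l.foldl lastNMinusMacdVolume_altStep ([], [])).1 ++ [x] ≠ [] := by simp
        simp only [hne]
        unfold pvTail
        simp [hx, hx', h1]
    · have hx' : (0:Int) < x := by omega
      have hT : pvTail (l ++ [x]) = pvTail l := by
        unfold pvTail; simp [hx']
      by_cases hc : (l.foldl lastNMinusMacdVolume_altStep ([], [])).1 = []
      · simp only [lastNMinusMacdVolume_altStep, if_neg hx, if_pos hc]
        refine ⟨?_, ?_⟩
        · simp [hc, hx]
        · rw [hT, ← h2, if_pos hc]
      · simp only [lastNMinusMacdVolume_altStep, if_neg hx, if_neg hc]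
        refine ⟨?_, ?_⟩
        · simp [hx]
        · rw [hT, ← h2, if_neg hc]
          simp

lemma foldl_min_out (l : List Int) (a x : Int) :
    l.foldl min (min a x) = min (l.foldl min a) x := by
  induction l generalizing a with
  | nil => rfl
  | cons y ys ih =>
    simp only [List.foldl_cons]
    rw [show min (min a x) y = min (min a y) x from by omega, ih]

lemma foldl_min_reverse (l : List Int) (a : Int) :
    l.reverse.foldl min a = l.foldl min a := by
  induction l generalizing a with
  | nil => rfl
  | cons y ys ih =>
    simp only [List.reverse_cons, List.foldl_append, List.foldl_cons, List.foldl_nil, ih]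
    rw [← foldl_min_out]

-- ===== VERDICT =====
theorem lastNMinusMacdVolume_spec : Claim_equal_lastNMinusMacdVolume := by
  intro l _
  unfold Spec_lastNMinusMacdVolume lastNMinusMacdVolume lastNMinusMacdVolume_alt
  obtain ⟨_, h2⟩ := alt_inv l
  rw [go_main, ← h2, foldl_min_reverse]
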